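-- pv_equiv track=rewrite | github.com/CompNeuroTchuGroup/TchuSNNet | Test_Results/Test10/Test10_replicate.py | order_files
-- ===== SOURCE A (Python) =====
-- def order_files(data_files):
--     pack1=[]
--     pack2=[]
--     for file in data_files:
--         if "alphaLtp_0.1" in file:
--             pack1.append(file)
--         else:
--             pack2.append(file)
--     return pack1 + pack2
-- ===== SOURCE B (Python) =====
-- def order_files(data_files):
--     return sorted(data_files, key=lambda f: "alphaLtp_0.1" not in f)
-- ===== Notes on version B (the rewrite author's own statement) =====
-- stated objective: idiomatic
-- what changed: Replaces the explicit two-accumulator partition loop and concatenation with one stable sort on a boolean key (matching files key False sort first, order within each group preserved by stability).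
import Mathlib
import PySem

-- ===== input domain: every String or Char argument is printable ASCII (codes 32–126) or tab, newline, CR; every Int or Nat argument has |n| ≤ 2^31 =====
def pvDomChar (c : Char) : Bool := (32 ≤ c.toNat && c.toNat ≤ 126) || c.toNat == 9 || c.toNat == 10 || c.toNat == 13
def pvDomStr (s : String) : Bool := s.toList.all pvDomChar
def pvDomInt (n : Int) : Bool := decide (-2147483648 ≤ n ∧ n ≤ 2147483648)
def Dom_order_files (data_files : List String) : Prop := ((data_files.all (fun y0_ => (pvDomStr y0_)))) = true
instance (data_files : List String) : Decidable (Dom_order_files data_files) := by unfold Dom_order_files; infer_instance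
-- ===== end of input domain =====

-- B replaces A's explicit two-list partition loop with one stable sort on a boolean key (idiomatic; same return value).

-- ===== PORT A =====
-- A: one pass appending each file to pack1 or pack2, then pack1 + pack2.
def order_files (data_files : List String) : List String :=
  let p := data_files.foldl
    (fun (acc : List String × List String) file =>
      if PySem.Str.isIn "alphaLtp_0.1" file then (acc.1 ++ [file], acc.2)
      else (acc.1, acc.2 ++ [file]))
    ([], [])
  p.1 ++ p.2

-- ===== PORT B =====
-- key=lambda f: "alphaLtp_0.1" not in f — Python's bool key (False < True) ported exactly as Nat 0/1.
def pvKeyB (f : String) : Nat := if PySem.Str.isIn "alphaLtp_0.1" f then 0 else 1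

def order_files_alt (data_files : List String) : List String :=
  PySem.List.sorted data_files pvKeyB

-- ===== PRECONDITION & SPEC =====
def Spec_order_files (data_files : List String) (out : List String) : Prop := out = order_files_alt data_files
instance (data_files : List String) (out : List String) : Decidable (Spec_order_files data_files out) := by unfold Spec_order_files; infer_instance

-- ===== CLAIM (what is proved, stated in full; the proofs are below) =====
def Claim_equal_order_files : Prop := ∀ (data_files : List String), Dom_order_files data_files → Spec_order_files data_files (order_files data_files)

-- ===== LEMMAS AND PROOFS =====

-- inserting a key-0 element into (all-key-0 P ++ all-key-1 Q) lands exactly between P and Q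
theorem pv_insertBy_key0 (x : String) (P Q : List String)
    (hP : ∀ y ∈ P, pvKeyB y = 0) (hQ : ∀ y ∈ Q, pvKeyB y = 1) (hx : pvKeyB x = 0) :
    PySem.List.insertBy (fun a b => decide (pvKeyB a < pvKeyB b)) x (P ++ Q)
      = P ++ x :: Q := by
  induction P with
  | nil =>
    cases Q with
    | nil => simp [PySem.List.insertBy]
    | cons y ys =>
      have hy := hQ y (by simp)
      simp [PySem.List.insertBy, hx, hy]
  | cons p P' ih =>
    have hp := hP p (by simp)
    simp only [List.cons_append, PySem.List.insertBy, hx, hp]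
    simp only [decide_eq_true_eq]
    rw [if_neg (by omega)]
    simp [ih (fun y hy => hP y (by simp [hy]))]

-- the stable-insertion foldl on a partitioned accumulator tracks A's two-accumulator loop
theorem pv_fold_eq (xs : List String) :
    ∀ (P Q : List String), (∀ y ∈ P, pvKeyB y = 0) → (∀ y ∈ Q, pvKeyB y = 1) →
    xs.foldl (fun acc x => PySem.List.insertBy (fun a b => decide (pvKeyB a < pvKeyB b)) x acc) (P ++ Q)
      = (xs.foldl
          (fun (acc : List String × List String) file =>
            if PySem.Str.isIn "alphaLtp_0.1" file then (acc.1 ++ [file], acc.2)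
            else (acc.1, acc.2 ++ [file]))
          (P, Q)).1
        ++ (xs.foldl
          (fun (acc : List String × List String) file =>
            if PySem.Str.isIn "alphaLtp_0.1" file then (acc.1 ++ [file], acc.2)
            else (acc.1, acc.2 ++ [file]))
          (P, Q)).2 := by
  induction xs with
  | nil => intro P Q _ _; simp
  | cons x xs ih =>
    intro P Q hP hQ
    by_cases h : PySem.Str.isIn "alphaLtp_0.1" x
    · have hx : pvKeyB x = 0 := by unfold pvKeyB; rw [if_pos h]
      simp only [List.foldl_cons]
      rw [if_pos h]
      rw [pv_insertBy_key0 x P Q hP hQ hx]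
      have : P ++ x :: Q = (P ++ [x]) ++ Q := by simp
      rw [this, ih (P ++ [x]) Q
        (by intro y hy; rcases List.mem_append.mp hy with h' | h'
            · exact hP y h'
            · simp at h'; subst h'; exact hx)
        hQ]
    · have hx : pvKeyB x = 1 := by unfold pvKeyB; rw [if_neg h]
      simp only [List.foldl_cons]
      rw [if_neg h]
      rw [PySem.List.insertBy_of_forall_not_before _ _ _
        (by intro y hy
            rcases List.mem_append.mp hy with h' | h'
            · have := hP y h'; simp [hx, this]
            · have := hQ y h'; simp [hx, this])]
      have : (P ++ Q) ++ [x] = P ++ (Q ++ [x]) := by simp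
      rw [this, ih P (Q ++ [x]) hP
        (by intro y hy; rcases List.mem_append.mp hy with h' | h'
            · exact hQ y h'
            · simp at h'; subst h'; exact hx)]

-- ===== VERDICT (by name: the statement is the Claim_ definition above) =====
theorem order_files_spec : Claim_equal_order_files := by
  intro data_files _
  show _ = _
  unfold order_files order_files_alt
  rw [PySem.List.sorted_eq_foldl_insertBy]
  have := pv_fold_eq data_files [] [] (by simp) (by simp)
  simpa using this.symm
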